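-- pv_equiv track=rewrite | github.com/dusty-schmidt/sports-sim | scripts/analyze_name_matching.py | find_exact_matches
-- ===== SOURCE A (Python) =====
-- from typing import Dict, List, Set, Tuple
--
-- def find_exact_matches(pool_players: List[str], stats_players: Dict[str, List[str]]) -> Dict[str, List[str]]:
--     """Find exact matches between pool and stats players."""
--     matches = {}
--
--     for pool_player in pool_players:
--         matches[pool_player] = []
--
--         for file, players in stats_players.items():
--             if pool_player in players:
--                 matches[pool_player].append(file)
--
--     return matches
-- ===== SOURCE B (Python) =====
-- from typing import Dict, List
--
-- def find_exact_matches(pool_players: List[str], stats_players: Dict[str, List[str]]) -> Dict[str, List[str]]: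
--     """Find exact matches between pool and stats players (one-pass scatter)."""
--     matches = {p: [] for p in pool_players}
--     pool_set = set(pool_players)
--     for file, players in stats_players.items():
--         for p in dict.fromkeys(players):  # distinct players of this file, in order
--             if p in pool_set:
--                 matches[p].append(file)
--     return matches
-- ===== Notes on version B (the rewrite author's own statement) =====
-- stated objective: faster
-- what changed: Inverts the nested pool-by-files gather into a single pass over the files that scatters each file into a pre-initialized per-player index, replacing the repeated 'player in players' list scans with one set lookup per distinct player.
import Mathlib
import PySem

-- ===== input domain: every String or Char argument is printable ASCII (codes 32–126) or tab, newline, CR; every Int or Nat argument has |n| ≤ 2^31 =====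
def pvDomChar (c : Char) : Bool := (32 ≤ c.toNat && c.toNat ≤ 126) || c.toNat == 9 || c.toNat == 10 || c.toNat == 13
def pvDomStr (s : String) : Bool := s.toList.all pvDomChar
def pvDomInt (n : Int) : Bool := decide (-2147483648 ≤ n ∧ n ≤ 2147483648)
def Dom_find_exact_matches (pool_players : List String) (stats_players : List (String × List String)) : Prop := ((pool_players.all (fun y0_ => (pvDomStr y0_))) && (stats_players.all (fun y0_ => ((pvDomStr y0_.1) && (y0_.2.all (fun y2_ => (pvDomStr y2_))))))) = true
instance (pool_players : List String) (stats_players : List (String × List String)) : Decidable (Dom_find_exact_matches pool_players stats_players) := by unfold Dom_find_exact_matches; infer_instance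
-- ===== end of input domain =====

-- B replaces A's nested pool×files gather by a single pass over the files scattering
-- into a pre-initialized per-player index (objective: faster, asymptotic).


-- ===== PORT A =====
-- literal port of A: for each pool player, insert [] then scan every file's list
def find_exact_matches (pool_players : List String) (stats_players : List (String × List String)) : List (String × List String) :=
  (pool_players.foldl (fun ms pool_player =>
      stats_players.foldl (fun m fp =>
          if fp.2.contains pool_player then m.modify pool_player [] (· ++ [fp.1]) else m)
        (ms.insert pool_player ([] : List String)))
    PySem.Dict.empty).items

-- ===== PORT B =====
-- literal port of Source B: init {p: [] for p in pool}, pool_set, one pass over the files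
def find_exact_matches_alt (pool_players : List String) (stats_players : List (String × List String)) : List (String × List String) :=
  let ms := pool_players.foldl (fun m p => m.insert p ([] : List String)) PySem.Dict.empty
  let pool_set := PySem.Set.ofList pool_players
  (stats_players.foldl (fun m fp =>
      (PySem.List.dedup fp.2).foldl (fun m' p =>
          if PySem.Set.contains pool_set p then m'.modify p [] (· ++ [fp.1]) else m')
        m)
    ms).items

-- ===== PRECONDITION & SPEC =====
def Spec_find_exact_matches (pool_players : List String) (stats_players : List (String × List String)) (out : List (String × List String)) : Prop := out = find_exact_matches_alt pool_players stats_players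
instance (pool_players : List String) (stats_players : List (String × List String)) (out : List (String × List String)) : Decidable (Spec_find_exact_matches pool_players stats_players out) := by unfold Spec_find_exact_matches; infer_instance

-- ===== CLAIM (what is proved, stated in full; the proofs are below) =====
def Claim_equal_find_exact_matches : Prop := ∀ (pool_players : List String) (stats_players : List (String × List String)), Dom_find_exact_matches pool_players stats_players → Spec_find_exact_matches pool_players stats_players (find_exact_matches pool_players stats_players)

-- ===== LEMMAS AND PROOFS =====

-- the files (in order) whose player list contains p
def pvF (stats : List (String × List String)) (p : String) : List String :=
  (stats.filter (fun fp => fp.2.contains p)).map (·.1)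

theorem pvModify_eq (d : PySem.Dict String (List String)) (k : String) (f : List String → List String) :
    d.modify k [] f = d.insert k (f (d.getD k [])) := rfl

-- A's inner loop over the files, started just after `matches[p] = []`
theorem pvA_inner (stats : List (String × List String)) (m : PySem.Dict String (List String))
    (p : String) (acc : List String) :
    stats.foldl (fun m fp => if fp.2.contains p then m.modify p [] (· ++ [fp.1]) else m)
      (m.insert p acc) = m.insert p (acc ++ pvF stats p) := by
  induction stats generalizing m acc with
  | nil => simp [pvF]
  | cons fp rest ih =>
    by_cases h : fp.2.contains p
    · have h' : p ∈ fp.2 := by simpa using h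
      rw [List.foldl_cons, if_pos h, pvModify_eq, PySem.Dict.getD_insert_self,
        PySem.Dict.insert_insert_self, ih]
      simp [pvF, h', List.append_assoc]
    · have h' : ¬ p ∈ fp.2 := by simpa using h
      rw [List.foldl_cons, if_neg h, ih]
      simp [pvF, h']

-- a fold inserting key p with value f p (f independent of the dict) builds the dedup index
theorem pvItems_foldl_insert_fn (xs : List String) (f : String → List String) :
    (xs.foldl (fun m p => m.insert p (f p)) PySem.Dict.empty).items
      = (PySem.Set.ofList xs).map (fun p => (p, f p)) := by
  induction xs using List.reverseRecOn with
  | nil => rfl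
  | append_singleton xs x ih =>
    rw [List.foldl_append, List.foldl_cons, List.foldl_nil, PySem.Set.ofList_append_singleton]
    have hkeys : (xs.foldl (fun m p => m.insert p (f p)) PySem.Dict.empty).keys
        = PySem.Set.ofList xs := by
      rw [PySem.Dict.keys_foldl_insert]; rfl
    by_cases hx : x ∈ PySem.Set.ofList xs
    · rw [PySem.Dict.items_insert_of_contains, ih, PySem.Set.add_of_mem hx, List.map_map]
      · refine List.map_congr_left (fun p _ => ?_)
        by_cases hpx : p = x <;> simp [hpx]
      · rw [PySem.Dict.contains_iff_mem_keys, hkeys]; exact hx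
    · rw [PySem.Dict.items_insert_of_not_contains, ih, PySem.Set.add_of_not_mem hx, List.map_append]
      · rfl
      · simp only [Bool.eq_false_iff, ne_eq, PySem.Dict.contains_iff_mem_keys, hkeys]
        exact hx
    
-- keys of a dict whose items are the index are the distinct pool players
theorem pvKeys_of_items (pool : List String) (g : String → List String)
    (m : PySem.Dict String (List String))
    (hm : m.items = (PySem.Set.ofList pool).map (fun p => (p, g p))) :
    m.keys = PySem.Set.ofList pool := by
  have h1 : m.keys = m.items.map (·.1) := rfl
  rw [h1, hm, List.map_map]
  exact (List.map_congr_left fun p _ => rfl).trans (List.map_id _)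

-- B's inner loop over one file's distinct players
theorem pvB_inner (pool : List String) (f : String) (qs : List String) (hq : qs.Nodup)
    (g : String → List String) (m : PySem.Dict String (List String))
    (hm : m.items = (PySem.Set.ofList pool).map (fun p => (p, g p))) :
    (qs.foldl (fun m' p =>
        if PySem.Set.contains (PySem.Set.ofList pool) p then m'.modify p [] (· ++ [f]) else m') m).items
      = (PySem.Set.ofList pool).map (fun p => (p, if p ∈ qs then g p ++ [f] else g p)) := by
  induction qs generalizing g m with
  | nil =>
    rw [List.foldl_nil, hm]
    exact List.map_congr_left fun p _ => by simp
  | cons q qs ih =>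
    obtain ⟨hq1, hq2⟩ := List.nodup_cons.mp hq
    rw [List.foldl_cons]
    by_cases hc : PySem.Set.contains (PySem.Set.ofList pool) q
    · have hqmem : q ∈ PySem.Set.ofList pool := by simpa using hc
      have hnd : m.keys.Nodup := by
        rw [pvKeys_of_items pool g m hm]; exact PySem.Set.nodup_ofList pool
      have hget : m.getD q [] = g q := by
        refine PySem.Dict.getD_of_mem_items m ?_ hnd []
        rw [hm]; exact List.mem_map.mpr ⟨q, hqmem, rfl⟩
      have hcont : m.contains q := by
        rw [PySem.Dict.contains_iff_mem_keys, pvKeys_of_items pool g m hm]; exact hqmem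
      have hitems : (m.modify q [] (· ++ [f])).items
          = (PySem.Set.ofList pool).map (fun p => (p, if p = q then g p ++ [f] else g p)) := by
        rw [pvModify_eq, hget, PySem.Dict.items_insert_of_contains m _ hcont, hm, List.map_map]
        refine List.map_congr_left (fun p _ => ?_)
        by_cases hpq : p = q <;> simp [hpq]
      rw [if_pos hc, ih hq2 _ _ hitems]
      refine List.map_congr_left (fun p _ => ?_)
      by_cases hpq : p = q
      · simp [hpq, hq1]
      · simp [hpq, List.mem_cons]
    · have hqmem : q ∉ PySem.Set.ofList pool := fun h => hc (by simpa using h)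
      rw [if_neg hc, ih hq2 g m hm]
      refine List.map_congr_left (fun p hp => ?_)
      have : p ≠ q := fun h => hqmem (h ▸ hp)
      simp [List.mem_cons, this]

-- B's outer loop over the files
theorem pvB_outer (pool : List String) (stats : List (String × List String))
    (g : String → List String) (m : PySem.Dict String (List String))
    (hm : m.items = (PySem.Set.ofList pool).map (fun p => (p, g p))) :
    (stats.foldl (fun m fp =>
        (PySem.List.dedup fp.2).foldl (fun m' p =>
            if PySem.Set.contains (PySem.Set.ofList pool) p then m'.modify p [] (· ++ [fp.1]) else m')
          m) m).items
      = (PySem.Set.ofList pool).map (fun p => (p, g p ++ pvF stats p)) := by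
  induction stats generalizing g m with
  | nil =>
    rw [List.foldl_nil, hm]
    refine List.map_congr_left (fun p _ => ?_); simp [pvF]
  | cons fp rest ih =>
    rw [List.foldl_cons]
    have h1 := pvB_inner pool fp.1 (PySem.List.dedup fp.2) (PySem.List.nodup_dedup fp.2) g m hm
    have h2 : ((PySem.List.dedup fp.2).foldl (fun m' p =>
          if PySem.Set.contains (PySem.Set.ofList pool) p then m'.modify p [] (· ++ [fp.1]) else m') m).items
        = (PySem.Set.ofList pool).map (fun p => (p, if fp.2.contains p then g p ++ [fp.1] else g p)) := by
      rw [h1]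
      refine List.map_congr_left (fun p _ => ?_)
      by_cases hpm : p ∈ fp.2
      · simp [hpm]
      · simp [hpm]
    rw [ih _ _ h2]
    refine List.map_congr_left (fun p _ => ?_)
    by_cases hpm : p ∈ fp.2 <;> simp [pvF, hpm, List.append_assoc]

-- ===== VERDICT (by name: the statement is the Claim_ definition above) =====
theorem find_exact_matches_spec : Claim_equal_find_exact_matches := by
  intro pool stats _
  unfold Spec_find_exact_matches find_exact_matches find_exact_matches_alt
  have hA : (pool.foldl (fun ms p =>
      stats.foldl (fun m fp =>
          if fp.2.contains p then m.modify p [] (· ++ [fp.1]) else m)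
        (ms.insert p ([] : List String))) PySem.Dict.empty)
      = pool.foldl (fun m p => m.insert p (pvF stats p)) PySem.Dict.empty := by
    congr 1
    funext m p
    rw [pvA_inner]
    simp
  rw [hA, pvItems_foldl_insert_fn]
  have hinit := pvItems_foldl_insert_fn pool (fun _ => ([] : List String))
  rw [pvB_outer pool stats (fun _ => []) _ hinit]
  refine (List.map_congr_left (fun p _ => ?_)).symm
  simp
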